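-- pv_equiv track=rewrite | github.com/johnnyhomeless/sitegen | src/markdown_to_html.py | extract_heading_content
-- ===== SOURCE A (Python) =====
-- def extract_heading_content(block):
--    count = 0
--    for char in block:
--        if char == '#':
--            count += 1
--            if count > 6:
--                raise ValueError("Max # allowed: 6")
--        else:
--            break
--
--    content = block[count:].strip()
--    if not content:
--        raise ValueError("Heading content cannot be empty")
--
--    return content, count
-- ===== SOURCE B (Python) =====
-- def extract_heading_content(block):
--     if block.startswith('#' * 7):
--         raise ValueError("Max # allowed: 6")
--     level = next(k for k in range(6, -1, -1) if block.startswith('#' * k))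
--     content = block[level:].strip()
--     if not content:
--         raise ValueError("Heading content cannot be empty")
--     return content, level
-- ===== Notes on version B (the rewrite author's own statement) =====
-- stated objective: alternative
-- what changed: Replaces A's per-character counting loop by prefix matching: B tests block.startswith('#'*7) for the cap and then finds the level as the largest k in 6..0 with block.startswith('#'*k), keeping the same strip/empty check.
import Mathlib
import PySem

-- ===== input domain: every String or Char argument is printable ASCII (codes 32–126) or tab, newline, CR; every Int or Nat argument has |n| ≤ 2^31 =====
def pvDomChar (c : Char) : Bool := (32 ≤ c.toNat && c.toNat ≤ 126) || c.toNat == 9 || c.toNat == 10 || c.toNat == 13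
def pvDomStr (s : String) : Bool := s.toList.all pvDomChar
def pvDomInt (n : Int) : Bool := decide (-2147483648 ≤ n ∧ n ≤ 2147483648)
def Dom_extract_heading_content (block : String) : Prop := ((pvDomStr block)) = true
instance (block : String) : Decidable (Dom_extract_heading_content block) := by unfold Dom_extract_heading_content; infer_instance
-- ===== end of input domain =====

-- B finds the heading level by prefix matching: it tests block.startswith('#'*k) for k = 7
-- (the cap) and then k = 6 down to 0, instead of A's per-character counting loop (alternative, same cost).
-- Pre_ excludes exactly the inputs where A raises ValueError (more than six leading '#', or empty stripped content).

-- ===== PORT A =====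
-- A's for-loop over the characters: counts leading '#', breaks at the first other
-- character; 'none' models the raise when count exceeds 6.
def pvALoop : List Char → Nat → Option Nat
  | [], count => some count
  | c :: rest, count =>
      if c = '#' then
        if count + 1 > 6 then none   -- raise ValueError("Max # allowed: 6")
        else pvALoop rest (count + 1)
      else some count                -- break

def extract_heading_content (block : String) : String × Int :=
  match pvALoop block.toList 0 with
  | none => ("", 0)                  -- unreachable under Pre_ (A raises)
  | some count =>
      let content := PySem.Chars.strip (PySem.List.slice block.toList (some (count : Int)) none)
      if content = [] then ("", 0)   -- unreachable under Pre_ (A raises)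
      else (String.ofList content, (count : Int))

-- ===== PORT B =====
-- block.startswith('#' * k) ported as List.isPrefixOf of a replicate (exact);
-- next(k for k in range(6, -1, -1) if …) ported as find? over [6,5,4,3,2,1,0]
-- (k = 0 always matches, so the generator never exhausts; getD 0 is a type-level default).
def extract_heading_content_alt (block : String) : String × Int :=
  let cs := block.toList
  if (List.replicate 7 '#').isPrefixOf cs then ("", 0)   -- raise ValueError("Max # allowed: 6")
  else
    let level := (([6, 5, 4, 3, 2, 1, 0] : List Nat).find?
        (fun k => (List.replicate k '#').isPrefixOf cs)).getD 0
    let content := PySem.Chars.strip (PySem.List.slice cs (some (level : Int)) none)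
    if content = [] then ("", 0)     -- raise ValueError("Heading content cannot be empty")
    else (String.ofList content, (level : Int))

-- ===== PRECONDITION & SPEC =====
-- Pre_ excludes exactly the inputs where A raises: more than six leading '#'
-- characters, or a content that strips to empty.
def Pre_extract_heading_content (block : String) : Prop :=
  (block.toList.takeWhile (· = '#')).length ≤ 6 ∧
  PySem.Chars.strip (block.toList.drop (block.toList.takeWhile (· = '#')).length) ≠ []
instance (block : String) : Decidable (Pre_extract_heading_content block) := by
  unfold Pre_extract_heading_content; infer_instance
def pvWitness_extract_heading_content : String := "## Title"

def Spec_extract_heading_content (block : String) (out : String × Int) : Prop := out = extract_heading_content_alt block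
instance (block : String) (out : String × Int) : Decidable (Spec_extract_heading_content block out) := by unfold Spec_extract_heading_content; infer_instance

-- ===== CLAIM (what is proved, stated in full; the proofs are below) =====
def Claim_equal_extract_heading_content : Prop := ∀ (block : String), Dom_extract_heading_content block → Pre_extract_heading_content block → Spec_extract_heading_content block (extract_heading_content block)

-- ===== LEMMAS AND PROOFS =====

-- A's loop returns the number of leading '#' (plus the incoming count) unless it passes 6.
lemma pvALoop_eq (cs : List Char) (c : Nat) (hc : c ≤ 6) :
    pvALoop cs c =
      (if (cs.takeWhile (· = '#')).length + c ≤ 6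
       then some ((cs.takeWhile (· = '#')).length + c) else none) := by
  induction cs generalizing c with
  | nil => simp [pvALoop, hc]
  | cons x rest ih =>
    by_cases hx : x = '#'
    · by_cases h7 : c + 1 > 6
      · simp [pvALoop, hx, h7]
        omega
      · rw [pvALoop, if_pos hx, if_neg h7, ih (c + 1) (by omega)]
        have ht : (List.takeWhile (fun x => decide (x = '#')) (x :: rest)).length
            = (List.takeWhile (fun x => decide (x = '#')) rest).length + 1 := by
          simp [hx]
        rw [ht, show c + 1 = 1 + c from Nat.add_comm c 1, ← Nat.add_assoc]
    · simp [pvALoop, hx, hc]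

-- A replicate of '#' is a prefix of cs exactly when k does not exceed the leading-'#' count.
lemma pvPrefix_iff (k : Nat) (cs : List Char) :
    (List.replicate k '#').isPrefixOf cs
      = decide (k ≤ (cs.takeWhile (· = '#')).length) := by
  induction k generalizing cs with
  | zero => simp
  | succ k ih =>
    cases cs with
    | nil => simp [List.replicate_succ]
    | cons x rest =>
      by_cases hx : x = '#'
      · simp [List.replicate_succ, hx, ih]
      · simp [List.replicate_succ, List.isPrefixOf, hx, Ne.symm hx]

-- The descending prefix search returns exactly the leading-'#' count when it is ≤ 6.
lemma pvFind_eq (cs : List Char) (h6 : (cs.takeWhile (· = '#')).length ≤ 6) :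
    (([6, 5, 4, 3, 2, 1, 0] : List Nat).find?
        (fun k => (List.replicate k '#').isPrefixOf cs)).getD 0
      = (cs.takeWhile (· = '#')).length := by
  set t := (cs.takeWhile (· = '#')).length with ht
  have hp : ∀ k, (List.replicate k '#').isPrefixOf cs = decide (k ≤ t) := fun k => by
    rw [pvPrefix_iff]
  simp only [List.find?, hp]
  interval_cases t <;> simp

-- ===== VERDICT (by name: the statement is the Claim_ definition above) =====
theorem extract_heading_content_spec : Claim_equal_extract_heading_content := by
  intro block _ hpre
  obtain ⟨h6, hne⟩ := hpre
  unfold Spec_extract_heading_content extract_heading_content extract_heading_content_alt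
  rw [pvALoop_eq _ 0 (by omega)]
  have h7 : (List.replicate 7 '#').isPrefixOf block.toList = false := by
    rw [pvPrefix_iff]; simp; omega
  simp only [Nat.add_zero, if_pos h6, h7, Bool.false_eq_true, if_false, pvFind_eq _ h6]
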